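-- pv_equiv track=rewrite | github.com/Yoon-men/CodingTest | BaekJoon/25192.py | joyGo
-- ===== SOURCE A (Python) =====
-- def joyGo(Li: list) :
--     ans = 0
--     Se = set()
--     for i in Li :
--         if i == "ENTER" :
--             Se.clear()
--             continue
--
--         if i not in Se :
--             Se.add(i)
--             ans += 1
--
--     return ans
-- ===== SOURCE B (Python) =====
-- def joyGo(Li: list):
--     # Two-phase: split Li into sessions at each "ENTER", then sum distinct counts per session.
--     groups = []
--     cur = []
--     for i in Li:
--         if i == "ENTER":
--             groups.append(cur)
--             cur = []
--         else:
--             cur.append(i)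
--     groups.append(cur)
--     return sum(len(set(g)) for g in groups)
-- ===== Notes on version B (the rewrite author's own statement) =====
-- stated objective: alternative
-- what changed: Replaces the single incremental pass with a running dedup set and counter by a two-phase group-then-aggregate computation: partition the list into sessions at each 'ENTER', then sum len(set(group)) over the groups.
import Mathlib
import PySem

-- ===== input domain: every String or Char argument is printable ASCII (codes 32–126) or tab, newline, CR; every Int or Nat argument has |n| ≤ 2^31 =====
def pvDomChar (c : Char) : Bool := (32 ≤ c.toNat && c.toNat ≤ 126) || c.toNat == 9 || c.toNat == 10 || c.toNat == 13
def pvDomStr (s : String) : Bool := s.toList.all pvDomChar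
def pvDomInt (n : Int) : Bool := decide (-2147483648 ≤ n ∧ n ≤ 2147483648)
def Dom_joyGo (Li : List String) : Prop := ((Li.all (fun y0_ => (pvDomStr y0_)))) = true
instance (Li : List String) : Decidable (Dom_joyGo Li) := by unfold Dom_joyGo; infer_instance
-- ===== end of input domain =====

-- B replaces A's single pass with a running dedup set and counter by a two-phase
-- computation: partition the list into sessions at each "ENTER", then sum the
-- distinct-element counts of the groups (objective: alternative decomposition).


-- ===== PORT A =====
-- A: one pass; clear the set at "ENTER", else count-and-add unseen greetings.
def joyGo (Li : List String) : Int :=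
  (Li.foldl
    (fun (st : Int × PySem.Set String) i =>
      if i == "ENTER" then (st.1, PySem.Set.empty)
      else if PySem.Set.contains st.2 i then st
      else (st.1 + 1, PySem.Set.add st.2 i))
    (0, PySem.Set.empty)).1

-- ===== PORT B =====
-- B: build the session groups, then sum len(set(g)) over the groups.
def joyGo_alt (Li : List String) : Int :=
  let st := Li.foldl
    (fun (st : List (List String) × List String) i =>
      if i == "ENTER" then (st.1 ++ [st.2], ([] : List String))
      else (st.1, st.2 ++ [i]))
    ([], [])
  ((st.1 ++ [st.2]).map (fun g => ((PySem.Set.ofList g).length : Int))).sum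

-- ===== PRECONDITION & SPEC =====
def Spec_joyGo (Li : List String) (out : Int) : Prop := out = joyGo_alt Li
instance (Li : List String) (out : Int) : Decidable (Spec_joyGo Li out) := by unfold Spec_joyGo; infer_instance

-- ===== CLAIM (what is proved, stated in full; the proofs are below) =====
def Claim_equal_joyGo : Prop := ∀ (Li : List String), Dom_joyGo Li → Spec_joyGo Li (joyGo Li)

-- ===== LEMMAS AND PROOFS =====

def pvSumDist (gs : List (List String)) : Int :=
  (gs.map (fun g => ((PySem.Set.ofList g).length : Int))).sum

def pvStepA : Int × PySem.Set String → String → Int × PySem.Set String :=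
  fun st i =>
    if i == "ENTER" then (st.1, PySem.Set.empty)
    else if PySem.Set.contains st.2 i then st
    else (st.1 + 1, PySem.Set.add st.2 i)

def pvStepB : List (List String) × List String → String → List (List String) × List String :=
  fun st i =>
    if i == "ENTER" then (st.1 ++ [st.2], ([] : List String))
    else (st.1, st.2 ++ [i])

theorem pvOfList_append_singleton (cur : List String) (i : String) :
    PySem.Set.ofList (cur ++ [i]) = PySem.Set.add (PySem.Set.ofList cur) i := by
  simp [PySem.Set.ofList_eq_foldl, List.foldl_append]

theorem pvSumDist_append (gs : List (List String)) (g : List String) :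
    pvSumDist (gs ++ [g]) = pvSumDist gs + ((PySem.Set.ofList g).length : Int) := by
  simp [pvSumDist]

theorem pvMain (Li : List String) :
    ∀ (gs : List (List String)) (cur : List String) (ans : Int),
      (Li.foldl pvStepA (ans, PySem.Set.ofList cur)).1
        + ((PySem.Set.ofList cur).length : Int) + pvSumDist gs
      = ans + pvSumDist ((Li.foldl pvStepB (gs, cur)).1 ++ [(Li.foldl pvStepB (gs, cur)).2]) := by
  induction Li with
  | nil =>
      intro gs cur ans
      simp [pvSumDist_append]; ring
  | cons i Li ih =>
      intro gs cur ans
      by_cases hE : i = "ENTER"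
      · subst hE
        simp only [List.foldl_cons, pvStepA, pvStepB, beq_self_eq_true, if_true]
        have h := ih (gs ++ [cur]) [] ans
        rw [show PySem.Set.ofList ([] : List String) = PySem.Set.empty from rfl] at h
        simp only [pvSumDist_append] at h ⊢
        rw [show ((PySem.Set.empty : PySem.Set String).length : Int) = 0 from rfl] at h
        omega
      · have hb : (i == "ENTER") = false := by simp [hE]
        simp only [List.foldl_cons, pvStepA, pvStepB, hb, if_false, Bool.false_eq_true]
        by_cases hm : i ∈ PySem.Set.ofList cur
        · have hc : PySem.Set.contains (PySem.Set.ofList cur) i = true := by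
            simpa [PySem.Set.contains] using hm
          rw [hc]
          have h := ih gs (cur ++ [i]) ans
          rw [pvOfList_append_singleton, PySem.Set.add_of_mem hm] at h
          simpa using h
        · have hc : PySem.Set.contains (PySem.Set.ofList cur) i = false := by
            simpa [PySem.Set.contains] using hm
          rw [hc]
          have h := ih gs (cur ++ [i]) (ans + 1)
          rw [pvOfList_append_singleton] at h
          rw [PySem.Set.add_of_not_mem hm] at h ⊢
          simp only [List.length_append, List.length_cons, List.length_nil] at h ⊢
          push_cast at h ⊢
          omega

-- ===== VERDICT (by name: the statement is the Claim_ definition above) =====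
theorem joyGo_spec : Claim_equal_joyGo := by
  intro Li _
  unfold Spec_joyGo
  have e1 : joyGo Li = (Li.foldl pvStepA (0, PySem.Set.ofList [])).1 := rfl
  have e2 : joyGo_alt Li
      = pvSumDist ((Li.foldl pvStepB ([], [])).1 ++ [(Li.foldl pvStepB ([], [])).2]) := rfl
  rw [e1, e2]
  have h := pvMain Li [] [] 0
  simpa [pvSumDist] using h
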